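-- pv_equiv track=rewrite | github.com/Vijay11-08/All-In-One-Directory | One Pattern/Star Number Patterns/print_patterns.py | palindrome_triangle
-- ===== SOURCE A (Python) =====
-- def palindrome_triangle(n: int) -> str:
--     lines: list[str] = []
--     max_line = " ".join(
--         str(x) for x in list(range(n, 0, -1)) + list(range(2, n + 1))
--     )
--     for i in range(1, n + 1):
--         seq = list(range(i, 0, -1)) + list(range(2, i + 1))
--         body = " ".join(str(x) for x in seq)
--         pad = (len(max_line) - len(body)) // 2
--         lines.append(" " * pad + body)
--     return "\n".join(lines)
-- ===== SOURCE B (Python) =====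
-- def palindrome_triangle(n: int) -> str:
--     if n <= 0:
--         return ""
--     # Build each row's body incrementally: row i+1 wraps row i in "i+1 ... i+1".
--     bodies = ["1"]
--     for i in range(2, n + 1):
--         bodies.append(str(i) + " " + bodies[-1] + " " + str(i))
--     width = len(bodies[-1])
--     out = []
--     for b in bodies:
--         out.append(" " * ((width - len(b)) // 2) + b)
--     return "\n".join(out)
-- ===== Notes on version B (the rewrite author's own statement) =====
-- stated objective: alternative
-- what changed: Instead of regenerating each row's number sequence from two range() calls and re-joining it, B extends the previous row's body string incrementally (row i wraps row i-1 between two copies of str(i)), takes the width from the last body, and pads in a second pass.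
import Mathlib
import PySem

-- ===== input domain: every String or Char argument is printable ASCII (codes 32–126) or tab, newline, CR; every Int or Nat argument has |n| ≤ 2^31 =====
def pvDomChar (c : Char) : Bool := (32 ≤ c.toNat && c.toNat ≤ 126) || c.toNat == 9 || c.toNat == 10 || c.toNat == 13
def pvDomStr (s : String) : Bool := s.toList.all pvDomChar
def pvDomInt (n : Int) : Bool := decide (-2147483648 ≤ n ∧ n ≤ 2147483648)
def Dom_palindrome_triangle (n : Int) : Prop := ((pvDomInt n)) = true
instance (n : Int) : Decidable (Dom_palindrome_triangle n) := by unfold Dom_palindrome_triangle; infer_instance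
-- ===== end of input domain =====

-- B builds each row's body by wrapping the previous row's body between two copies of str(i)
-- (instead of regenerating the row from two range() calls) and pads in a second pass; same cost, different decomposition.

-- " " * pad  (a negative pad gives "", as in Python)
def pvSpaces (k : Int) : String := String.ofList (List.replicate k.toNat ' ')

-- ===== PORT A =====
-- " ".join(str(x) for x in list(range(i, 0, -1)) + list(range(2, i + 1)))  (A's expression for max_line, with i = n, and for each row's body)
def pvBodyA (i : Int) : String :=
  PySem.Str.join " " ((PySem.List.pyRange i 0 (-1) ++ PySem.List.pyRange 2 (i + 1) 1).map PySem.Int.toStr)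

def palindrome_triangle (n : Int) : String :=
  let maxLine := pvBodyA n
  let lines := (PySem.List.pyRange 1 (n + 1) 1).foldl
    (fun lines i =>
      let body := pvBodyA i
      let pad := PySem.Int.floordiv (PySem.Str.len maxLine - PySem.Str.len body) 2
      lines ++ [pvSpaces pad ++ body]) ([] : List String)
  PySem.Str.join "\n" lines

-- ===== PORT B =====
def palindrome_triangle_alt (n : Int) : String :=
  if n ≤ 0 then "" else
  let bodies := (PySem.List.pyRange 2 (n + 1) 1).foldl
    (fun bs i =>
      bs ++ [PySem.Int.toStr i ++ " " ++ PySem.List.pyGetD bs (-1) "" ++ " " ++ PySem.Int.toStr i])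
    ["1"]
  let width := PySem.Str.len (PySem.List.pyGetD bodies (-1) "")
  let out := bodies.foldl
    (fun acc b =>
      acc ++ [pvSpaces (PySem.Int.floordiv (width - PySem.Str.len b) 2) ++ b]) ([] : List String)
  PySem.Str.join "\n" out

-- ===== PRECONDITION & SPEC =====
def Spec_palindrome_triangle (n : Int) (out : String) : Prop := out = palindrome_triangle_alt n
instance (n : Int) (out : String) : Decidable (Spec_palindrome_triangle n out) := by unfold Spec_palindrome_triangle; infer_instance

-- ===== CLAIM (what is proved, stated in full; the proofs are below) =====
def Claim_equal_palindrome_triangle : Prop := ∀ (n : Int), Dom_palindrome_triangle n → Spec_palindrome_triangle n (palindrome_triangle n)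

-- ===== LEMMAS AND PROOFS =====

theorem pvJoin_append_singleton (sep y : List Char) (l : List (List Char)) (h : l ≠ []) :
    PySem.Chars.join sep (l ++ [y]) = PySem.Chars.join sep l ++ sep ++ y := by
  induction l with
  | nil => exact absurd rfl h
  | cons a l ih =>
    cases l with
    | nil => simp [PySem.Chars.join_cons_cons, PySem.Chars.join_singleton]
    | cons b l' =>
      rw [List.cons_append, PySem.Chars.join_cons_cons, List.cons_append,
          PySem.Chars.join_cons_cons, ← List.cons_append, ih (by simp)]
      simp [List.append_assoc]

theorem pvBodyA_one : pvBodyA 1 = "1" := by decide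

theorem pvBodyA_succ (i : Int) (h : 1 ≤ i) :
    pvBodyA (i + 1) = PySem.Int.toStr (i + 1) ++ " " ++ pvBodyA i ++ " " ++ PySem.Int.toStr (i + 1) := by
  apply String.toList_injective
  have hsplit : (PySem.List.pyRange (i+1) 0 (-1) ++ PySem.List.pyRange 2 (i+1+1) 1).map PySem.Int.toStr
      = PySem.Int.toStr (i+1) :: ((PySem.List.pyRange i 0 (-1) ++ PySem.List.pyRange 2 (i+1) 1).map PySem.Int.toStr ++ [PySem.Int.toStr (i+1)]) := by
    rw [PySem.List.pyRange_neg_one_cons (by omega), PySem.List.pyRange_one_succ_right (by omega)]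
    simp [show i + 1 - 1 = i by ring]
  unfold pvBodyA
  rw [hsplit]
  have hne : (PySem.List.pyRange i 0 (-1) ++ PySem.List.pyRange 2 (i + 1) 1).map PySem.Int.toStr ≠ [] := by
    have : PySem.List.pyRange i 0 (-1) ++ PySem.List.pyRange 2 (i + 1) 1 ≠ [] := by
      rw [PySem.List.pyRange_neg_one_cons (by omega)]; exact List.cons_ne_nil _ _
    simpa using this
  obtain ⟨a, l, hal⟩ := List.exists_cons_of_ne_nil hne
  rw [hal]
  simp only [PySem.Str.toList_join, String.toList_append, List.map_cons, List.map_append,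
    List.map_nil, List.cons_append]
  rw [show (PySem.Int.toStr (i+1)).toList :: String.toList a :: (List.map String.toList l ++ [(PySem.Int.toStr (i+1)).toList])
        = ((PySem.Int.toStr (i+1)).toList :: String.toList a :: List.map String.toList l) ++ [(PySem.Int.toStr (i+1)).toList] by simp]
  rw [pvJoin_append_singleton _ _ _ (List.cons_ne_nil _ _), PySem.Chars.join_cons_cons]

-- a foldl that only appends singletons is a map
theorem pvFoldl_append_map {α β : Type} (g : α → β) (l : List α) (init : List β) :
    l.foldl (fun acc x => acc ++ [g x]) init = init ++ l.map g := by
  induction l generalizing init with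
  | nil => simp
  | cons a l ih => simp [ih]

theorem pvLast_getD (xs : List String) (x : String) :
    PySem.List.pyGetD (xs ++ [x]) (-1) "" = x := by
  simp [PySem.List.pyGetD, PySem.List.pyGet?_neg_one_append_singleton]

-- B's first loop builds exactly the list of A's row bodies for rows 1..n
theorem pvBodies_eq (n : Int) (h : 1 ≤ n) :
    (PySem.List.pyRange 2 (n + 1) 1).foldl
      (fun bs i =>
        bs ++ [PySem.Int.toStr i ++ " " ++ PySem.List.pyGetD bs (-1) "" ++ " " ++ PySem.Int.toStr i])
      ["1"]
    = (PySem.List.pyRange 1 (n + 1) 1).map pvBodyA := by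
  induction n, h using Int.le_induction with
  | base =>
    rw [PySem.List.pyRange_one_eq_nil (by omega)]
    rw [show (1:Int) + 1 = 1 + 1 by ring, PySem.List.pyRange_one_succ_right (by omega),
        PySem.List.pyRange_one_eq_nil (by omega)]
    simp [pvBodyA_one]
  | succ n hn ih =>
    rw [show n + 1 + 1 = (n + 1) + 1 by ring]
    rw [PySem.List.pyRange_one_succ_right (show (2:Int) ≤ n + 1 by omega),
        PySem.List.pyRange_one_succ_right (show (1:Int) ≤ n + 1 by omega)]
    rw [List.foldl_append, ih, List.map_append, List.map_singleton]
    rw [show PySem.List.pyRange 1 (n + 1) 1 = PySem.List.pyRange 1 n 1 ++ [n] from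
        PySem.List.pyRange_one_succ_right (by omega)]
    simp only [List.foldl_cons, List.foldl_nil, List.map_append, List.map_cons, List.map_nil]
    rw [pvLast_getD, pvBodyA_succ n hn]

-- ===== VERDICT (by name: the statement is the Claim_ definition above) =====
theorem palindrome_triangle_spec : Claim_equal_palindrome_triangle := by
  intro n _
  unfold Spec_palindrome_triangle palindrome_triangle palindrome_triangle_alt
  by_cases hn : n ≤ 0
  · rw [if_pos hn, PySem.List.pyRange_one_eq_nil (by omega)]
    simp only [List.foldl_nil]
    apply String.toList_injective
    rw [PySem.Str.toList_join]
    simp [PySem.Chars.join_nil]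
  · rw [if_neg hn]
    have h1 : (1:Int) ≤ n := by omega
    simp only [pvBodies_eq n h1]
    rw [show PySem.List.pyRange 1 (n + 1) 1 = PySem.List.pyRange 1 n 1 ++ [n] from
        PySem.List.pyRange_one_succ_right (by omega)]
    rw [List.map_append, List.map_singleton, pvLast_getD]
    rw [pvFoldl_append_map, pvFoldl_append_map]
    simp only [List.nil_append, List.map_append, List.map_map, List.map_cons, List.map_nil]
    rfl
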